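-- pv_equiv track=rewrite | github.com/ehersch/cs224n_gpt | src/result_code/dataset_statistics.py | aggregate_by_split
-- ===== SOURCE A (Python) =====
-- def file_label(filename: str) -> str:
--     """Map filename to one of 'train', 'dev', 'test' for plot labels."""
--     n = filename.lower()
--     if "train" in n:
--         return "train"
--     if "dev" in n:
--         return "dev"
--     if "test" in n or "held_out" in n:
--         return "test"
--     return "train"
--
-- def aggregate_by_split(by_file: dict[str, int]) -> tuple[list[str], list[int]]:
--     """Aggregate by_file counts by train/dev/test labels. Returns (names, counts) in train, dev, test order."""
--     agg: dict[str, int] = {"train": 0, "dev": 0, "test": 0}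
--     for name, count in by_file.items():
--         label = file_label(name)
--         agg[label] = agg.get(label, 0) + count
--     names = [k for k in ("train", "dev", "test") if agg.get(k, 0) > 0]
--     counts = [agg[k] for k in names]
--     return names, counts
-- ===== SOURCE B (Python) =====
-- def file_label(filename: str) -> str:
--     """Map filename to one of 'train', 'dev', 'test' for plot labels."""
--     n = filename.lower()
--     if "train" in n:
--         return "train"
--     if "dev" in n:
--         return "dev"
--     if "test" in n or "held_out" in n:
--         return "test"
--     return "train"
--
-- def aggregate_by_split(by_file: dict[str, int]) -> tuple[list[str], list[int]]:
--     """Aggregate by_file counts by train/dev/test labels. Returns (names, counts) in train, dev, test order."""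
--     names: list[str] = []
--     counts: list[int] = []
--     for label in ("train", "dev", "test"):
--         total = sum(c for f, c in by_file.items() if file_label(f) == label)
--         if total > 0:
--             names.append(label)
--             counts.append(total)
--     return names, counts
-- ===== Notes on version B (the rewrite author's own statement) =====
-- stated objective: simpler
-- what changed: Replaces the accumulator dict (one indexing pass plus two comprehensions over it) with a direct loop over the fixed label order that computes each label's total by a filtered sum over by_file and appends it only when positive.
import Mathlib
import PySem

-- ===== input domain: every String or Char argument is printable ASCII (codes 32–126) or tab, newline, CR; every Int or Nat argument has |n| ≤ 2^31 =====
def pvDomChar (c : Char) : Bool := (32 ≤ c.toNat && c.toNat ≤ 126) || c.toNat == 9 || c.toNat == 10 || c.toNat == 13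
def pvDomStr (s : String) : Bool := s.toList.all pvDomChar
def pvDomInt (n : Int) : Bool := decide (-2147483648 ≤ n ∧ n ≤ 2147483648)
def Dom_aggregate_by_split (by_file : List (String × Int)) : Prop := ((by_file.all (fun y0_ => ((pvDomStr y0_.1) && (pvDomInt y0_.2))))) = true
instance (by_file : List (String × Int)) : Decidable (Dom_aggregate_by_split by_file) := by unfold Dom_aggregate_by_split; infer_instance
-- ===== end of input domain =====

-- B drops A's accumulator dict: it loops over the fixed label order and computes each
-- label's total by a filtered sum over by_file, appending only positive totals (simpler).


-- ===== PORT A =====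
-- shared helper: Python's file_label
def fileLabel (filename : String) : String :=
  let n := PySem.Str.lower filename
  if PySem.Str.isIn "train" n then "train"
  else if PySem.Str.isIn "dev" n then "dev"
  else if PySem.Str.isIn "test" n || PySem.Str.isIn "held_out" n then "test"
  else "train"

def aggregate_by_split (by_file : List (String × Int)) : List String × List Int :=
  let agg0 : PySem.Dict String Int := PySem.Dict.ofList [("train", 0), ("dev", 0), ("test", 0)]
  let agg := by_file.foldl
    (fun agg p => agg.insert (fileLabel p.1) (agg.getD (fileLabel p.1) 0 + p.2)) agg0
  let names := ["train", "dev", "test"].filter (fun k => agg.getD k 0 > 0)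
  -- Python's agg[k]: exact as getD since every k ∈ names is one of the three initial keys
  let counts := names.map (fun k => agg.getD k 0)
  (names, counts)

-- ===== PORT B =====
def aggregate_by_split_alt (by_file : List (String × Int)) : List String × List Int :=
  ["train", "dev", "test"].foldl
    (fun (acc : List String × List Int) label =>
      let total := ((by_file.filter (fun p => fileLabel p.1 == label)).map Prod.snd).sum
      if total > 0 then (acc.1 ++ [label], acc.2 ++ [total]) else acc)
    ([], [])

-- ===== PRECONDITION & SPEC =====
def Spec_aggregate_by_split (by_file : List (String × Int)) (out : List String × List Int) : Prop := out = aggregate_by_split_alt by_file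
instance (by_file : List (String × Int)) (out : List String × List Int) : Decidable (Spec_aggregate_by_split by_file out) := by unfold Spec_aggregate_by_split; infer_instance

-- ===== CLAIM (what is proved, stated in full; the proofs are below) =====
def Claim_equal_aggregate_by_split : Prop := ∀ (by_file : List (String × Int)), Dom_aggregate_by_split by_file → Spec_aggregate_by_split by_file (aggregate_by_split by_file)

-- ===== LEMMAS AND PROOFS =====

-- A's accumulation loop computes, for every key k, the filtered sum over the list.
theorem getD_agg_loop (l : List (String × Int)) (d : PySem.Dict String Int) (k : String) :
    (l.foldl (fun agg p => agg.insert (fileLabel p.1) (agg.getD (fileLabel p.1) 0 + p.2)) d).getD k 0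
      = d.getD k 0 + ((l.filter (fun p => fileLabel p.1 == k)).map Prod.snd).sum := by
  induction l generalizing d with
  | nil => simp
  | cons p l ih =>
    simp only [List.foldl_cons, ih, List.filter_cons]
    by_cases h : fileLabel p.1 = k
    · subst h
      simp [PySem.Dict.getD_eq_get?_getD, PySem.Dict.get?_insert_self]
      ring
    · have h' : k ≠ fileLabel p.1 := Ne.symm h
      simp [PySem.Dict.getD_eq_get?_getD, PySem.Dict.get?_insert_of_ne _ _ h', h]

-- the initial dict maps every key to 0 (present keys hold 0, absent ones take the default)
theorem agg0_getD (k : String) :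
    (PySem.Dict.ofList [("train", (0 : Int)), ("dev", 0), ("test", 0)]).getD k 0 = 0 := by
  have h : PySem.Dict.ofList [("train", (0 : Int)), ("dev", 0), ("test", 0)]
      = PySem.Dict.mk [("train", 0), ("dev", 0), ("test", 0)] := by rfl
  rw [h]
  simp [PySem.Dict.getD_eq_get?_getD, PySem.Dict.get?_mk_cons]
  split_ifs <;> rfl

-- ===== VERDICT (by name: the statement is the Claim_ definition above) =====
theorem aggregate_by_split_spec : Claim_equal_aggregate_by_split := by
  intro by_file _
  show _ = _
  unfold aggregate_by_split aggregate_by_split_alt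
  simp only [getD_agg_loop, agg0_getD, zero_add]
  by_cases ht : ((by_file.filter (fun p => fileLabel p.1 == "train")).map Prod.snd).sum > 0 <;>
  by_cases hd : ((by_file.filter (fun p => fileLabel p.1 == "dev")).map Prod.snd).sum > 0 <;>
  by_cases hs : ((by_file.filter (fun p => fileLabel p.1 == "test")).map Prod.snd).sum > 0 <;>
    simp [List.filter, List.foldl, ht, hd, hs]
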